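-- pv_equiv track=rewrite | github.com/mgtezak/Advent_of_Code | 2025/06/p1.py | part1
-- ===== SOURCE A (Python) =====
-- from math import prod
--
-- def part1(puzzle_input):
--     lines = [line.split() for line in puzzle_input.splitlines()]
--     operators = {"*": prod, "+": sum}
--     total = 0
--     for i in range(len(lines[0])):
--         column = [line[i] for line in lines]
--         nums = map(int, column[:-1])
--         op = operators[column[-1]]
--         total += op(nums)
--
--     return total
-- ===== SOURCE B (Python) =====
-- def part1(puzzle_input):
--     rows = [line.split() for line in puzzle_input.splitlines()]
--     ops = rows[-1]
--     n = len(rows[0])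
--     identity = {"+": 0, "*": 1}
--     acc = [identity[ops[i]] for i in range(n)]
--     for row in rows[:-1]:
--         for i in range(n):
--             v = int(row[i])
--             if ops[i] == "+":
--                 acc[i] += v
--             else:
--                 acc[i] *= v
--     return sum(acc)
-- ===== Notes on version B (the rewrite author's own statement) =====
-- stated objective: alternative
-- what changed: B replaces A's column-major pass (build each column, then reduce it with sum/prod) by a row-major streaming pass that seeds one accumulator per column with the operator's identity (0 for '+', 1 for '*') and folds every data row into all column accumulators at once, finally summing the accumulators.
import Mathlib
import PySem

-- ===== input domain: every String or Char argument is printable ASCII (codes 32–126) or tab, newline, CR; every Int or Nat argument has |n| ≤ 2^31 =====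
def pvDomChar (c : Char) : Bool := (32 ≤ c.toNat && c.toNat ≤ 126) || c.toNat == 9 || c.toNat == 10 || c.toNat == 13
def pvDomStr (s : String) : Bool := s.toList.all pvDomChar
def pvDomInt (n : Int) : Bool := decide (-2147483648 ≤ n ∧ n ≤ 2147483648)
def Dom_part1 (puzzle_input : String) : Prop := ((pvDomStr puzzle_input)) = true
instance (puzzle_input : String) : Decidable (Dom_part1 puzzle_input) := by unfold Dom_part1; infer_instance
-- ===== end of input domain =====

-- B changes the decomposition: a row-major streaming pass over per-column accumulators seeded
-- with each operator's identity, instead of A's column-major build-then-reduce; same cost.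

-- shared tokenisation helper: [line.split() for line in puzzle_input.splitlines()]
def pvRows (s : String) : List (List String) := (PySem.Str.splitlines s).map PySem.Str.split₀

-- ===== PORT A =====
-- '.getD i ""' / '.getD 0' / the final 'else sum' stand for Python's raising line[i], int(...)
-- and operators[...] lookups; Pre_part1 excludes exactly the inputs on which those raise.
def part1 (puzzle_input : String) : Int :=
  let lines := pvRows puzzle_input
  (List.range (lines.headD []).length).foldl
    (fun total i =>
      let column := lines.map (fun line => line.getD i "")
      let nums := column.dropLast.map (fun c => (PySem.Int.ofStr? c).getD 0)
      let op := column.getLastD ""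
      total + (if op = "*" then nums.prod else nums.sum))
    0

-- ===== PORT B =====
-- 'ops.getD i ""' / '.getD 0' stand for Python's raising ops[i] / int(...); the identity-dict
-- lookup identity[ops[i]] is ported as its if-form (KeyError excluded by Pre_part1).
def part1_alt (puzzle_input : String) : Int :=
  let rows := pvRows puzzle_input
  let ops := rows.getLastD []
  let n := (rows.headD []).length
  let acc0 := (List.range n).map (fun i => if ops.getD i "" = "+" then (0 : Int) else 1)
  (rows.dropLast.foldl
    (fun acc row =>
      (List.range n).map (fun i =>
        let v := (PySem.Int.ofStr? (row.getD i "")).getD 0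
        if ops.getD i "" = "+" then acc.getD i 0 + v else acc.getD i 0 * v))
    acc0).sum

-- ===== PRECONDITION & SPEC =====
-- Pre_part1: exactly the inputs on which Python A returns: at least one line; every line has a
-- token in each of the first len(lines[0]) columns; the last line's token there is "*" or "+";
-- every other token there parses as a Python int.
def Pre_part1 (puzzle_input : String) : Prop :=
  pvRows puzzle_input ≠ [] ∧
  ∀ i ∈ List.range ((pvRows puzzle_input).headD []).length,
    (∀ row ∈ pvRows puzzle_input, i < row.length) ∧
    ((pvRows puzzle_input).getLastD []).getD i "" ∈ (["*", "+"] : List String) ∧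
    ∀ row ∈ (pvRows puzzle_input).dropLast, (PySem.Int.ofStr? (row.getD i "")).isSome = true

instance (puzzle_input : String) : Decidable (Pre_part1 puzzle_input) := by
  unfold Pre_part1; infer_instance

def pvWitness_part1 : String := "1 2\n3 4\n+ *"

def Spec_part1 (puzzle_input : String) (out : Int) : Prop := out = part1_alt puzzle_input
instance (puzzle_input : String) (out : Int) : Decidable (Spec_part1 puzzle_input out) := by unfold Spec_part1; infer_instance

-- ===== CLAIM (what is proved, stated in full; the proofs are below) =====
def Claim_equal_part1 : Prop := ∀ (puzzle_input : String), Dom_part1 puzzle_input → Pre_part1 puzzle_input → Spec_part1 puzzle_input (part1 puzzle_input)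

-- ===== LEMMAS AND PROOFS =====

theorem pv_getD_map_range {α : Type} (g : Nat → α) (n i : Nat) (d : α) (hi : i < n) :
    ((List.range n).map g).getD i d = g i := by
  simp [List.getD_eq_getElem?_getD, hi]

-- component i of B's fold only ever reads component i of the accumulator
theorem pv_foldl_comp {α : Type} (n : Nat) (f : Int → α → Nat → Int) (i : Nat) (hi : i < n)
    (data : List α) :
    ∀ (acc : List Int),
    (data.foldl (fun acc row => (List.range n).map (fun j => f (acc.getD j 0) row j)) acc).getD i 0
      = data.foldl (fun a row => f a row i) (acc.getD i 0) := by
  induction data with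
  | nil => intro acc; rfl
  | cons row data ih =>
      intro acc
      simp only [List.foldl_cons, ih]
      rw [pv_getD_map_range _ _ _ _ hi]

theorem pv_foldl_len {α : Type} (n : Nat) (f : Int → α → Nat → Int) (data : List α) :
    ∀ (acc : List Int), acc.length = n →
    (data.foldl (fun acc row => (List.range n).map (fun j => f (acc.getD j 0) row j)) acc).length
      = n := by
  induction data with
  | nil => intro acc h; exact h
  | cons row data ih => intro acc _; exact ih _ (by simp)

theorem pv_sum_eq_range_getD (l : List Int) :
    l.sum = ((List.range l.length).map (fun i => l.getD i 0)).sum := by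
  induction l with
  | nil => simp
  | cons x l ih =>
      simp only [List.length_cons, List.range_succ_eq_map, List.map_cons, List.map_map,
        List.sum_cons]
      simp only [Function.comp_def, List.getD_cons_zero, List.getD_cons_succ]
      rw [← ih]

theorem pv_foldl_mul {α : Type} (g : α → Int) (l : List α) :
    ∀ (a : Int), l.foldl (fun s x => s * g x) a = a * (l.map g).prod := by
  induction l with
  | nil => intro a; simp
  | cons x l ih => intro a; simp [ih, mul_assoc]

theorem pv_getLastD_map (rows : List (List String)) (h : rows ≠ []) (f : List String → String)
    (d : String) : (rows.map f).getLastD d = f (rows.getLastD []) := by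
  simp only [List.getLastD_eq_getLast?, List.getLast?_map]
  obtain ⟨x, hx⟩ := List.getLast?_isSome.mpr h |> Option.isSome_iff_exists.mp
  simp [hx]

-- ===== VERDICT (by name: the statement is the Claim_ definition above) =====
theorem part1_spec : Claim_equal_part1 := by
  intro s _ hpre
  unfold Spec_part1 part1 part1_alt
  unfold Pre_part1 at hpre
  generalize pvRows s = rows at hpre ⊢
  obtain ⟨hne, hcol⟩ := hpre
  simp only []
  rw [PySem.List.foldl_add
      (g := fun i =>
        if (rows.map (fun line => line.getD i "")).getLastD "" = "*"
        then ((rows.map (fun line => line.getD i "")).dropLast.map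
          (fun c => (PySem.Int.ofStr? c).getD 0)).prod
        else ((rows.map (fun line => line.getD i "")).dropLast.map
          (fun c => (PySem.Int.ofStr? c).getD 0)).sum), zero_add]
  conv_rhs => rw [pv_sum_eq_range_getD]
  rw [pv_foldl_len (rows.headD []).length
      (fun a row j =>
        if (rows.getLastD []).getD j "" = "+"
        then a + (PySem.Int.ofStr? (row.getD j "")).getD 0
        else a * (PySem.Int.ofStr? (row.getD j "")).getD 0)
      rows.dropLast
      (List.map (fun i => if (rows.getLastD []).getD i "" = "+" then (0 : Int) else 1)
        (List.range (rows.headD []).length))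
      (by simp)]
  apply congrArg
  apply List.map_congr_left
  intro i hi
  have hin : i < (rows.headD []).length := List.mem_range.mp hi
  rw [pv_foldl_comp (α := List String) (rows.headD []).length
        (fun a row j =>
          if (rows.getLastD []).getD j "" = "+"
          then a + (PySem.Int.ofStr? (row.getD j "")).getD 0
          else a * (PySem.Int.ofStr? (row.getD j "")).getD 0) i hin rows.dropLast]
  rw [pv_getD_map_range _ _ _ _ hin]
  rw [pv_getLastD_map rows hne]
  rw [← List.map_dropLast, List.map_map]
  obtain ⟨-, hop, -⟩ := hcol i hi
  simp only [List.mem_cons, List.not_mem_nil, or_false] at hop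
  rcases hop with hop | hop
  · -- operator "*"
    rw [hop]
    simp only [reduceIte, if_neg (by decide : ¬ ("*" : String) = "+")]
    rw [pv_foldl_mul (α := List String)
        (g := fun row => (PySem.Int.ofStr? (row.getD i "")).getD 0) rows.dropLast 1, one_mul]
    simp [Function.comp_def]
  · -- operator "+"
    rw [hop]
    simp only [if_neg (by decide : ¬ ("+" : String) = "*"), reduceIte]
    rw [PySem.List.foldl_add (β := List String)
        (g := fun row => (PySem.Int.ofStr? (row.getD i "")).getD 0), zero_add]
    simp [Function.comp_def]
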